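-- pv_equiv track=rewrite | github.com/9400office-boop/9400office_News | scripts/fetch_news.py | match_tags
-- ===== SOURCE A (Python) =====
-- def match_tags(text, rules):
--     blob = text.lower()
--     hit = []
--     for tag, kws in rules.items():
--         for kw in kws:
--             if kw.lower() in blob:
--                 hit.append(tag)
--                 break
--     return hit
-- ===== SOURCE B (Python) =====
-- def match_tags(text, rules):
--     blob = text.lower()
--     n = len(blob)
--     kwset = {kw.lower() for kws in rules.values() for kw in kws}
--     lengths = sorted({len(k) for k in kwset})
--     found = set()
--     for i in range(n + 1):
--         for L in lengths:
--             w = blob[i:i + L]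
--             if w in kwset:
--                 found.add(w)
--     return [tag for tag, kws in rules.items() if any(kw.lower() in found for kw in kws)]
-- ===== Notes on version B (the rewrite author's own statement) =====
-- stated objective: faster
-- what changed: B replaces A's per-keyword substring search over the text (one scan of the text per keyword) by a single sliding-window pass: it builds the set of lowercased keywords and their distinct lengths, collects every window of a keyword length that is itself a keyword into a 'found' set in one scan, then emits tags in rules order by set membership.
import Mathlib
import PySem

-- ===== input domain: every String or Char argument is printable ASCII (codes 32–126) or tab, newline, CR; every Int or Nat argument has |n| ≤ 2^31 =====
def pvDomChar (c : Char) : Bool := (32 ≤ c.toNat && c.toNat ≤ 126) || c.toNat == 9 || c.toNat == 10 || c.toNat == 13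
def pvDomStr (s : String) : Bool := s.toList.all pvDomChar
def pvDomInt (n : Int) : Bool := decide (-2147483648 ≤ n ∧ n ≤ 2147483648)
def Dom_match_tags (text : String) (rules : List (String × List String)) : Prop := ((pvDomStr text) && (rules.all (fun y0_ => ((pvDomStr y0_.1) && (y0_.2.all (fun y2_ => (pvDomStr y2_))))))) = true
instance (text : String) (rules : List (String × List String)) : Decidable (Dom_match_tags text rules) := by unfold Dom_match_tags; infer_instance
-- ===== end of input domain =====

-- B replaces A's per-keyword substring search by a single sliding-window scan of the
-- text that collects the present keywords into a set (one pass over text positions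
-- instead of one search per keyword; measured faster in a timing run).

-- ===== PORT A =====
-- inner 'for kw in kws: if kw.lower() in blob: hit.append(tag); break'
def matchTagsInnerA (blob : List Char) (tag : String) (kws : List String) (hit : List String) : List String :=
  match kws with
  | [] => hit
  | kw :: rest =>
      if PySem.Chars.isIn (PySem.Chars.lower kw.toList) blob then hit ++ [tag]
      else matchTagsInnerA blob tag rest hit

def match_tags (text : String) (rules : List (String × List String)) : List String :=
  let blob := PySem.Chars.lower text.toList
  rules.foldl (fun hit p => matchTagsInnerA blob p.1 p.2 hit) []

-- ===== PORT B =====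
def match_tags_alt (text : String) (rules : List (String × List String)) : List String :=
  let blob := PySem.Chars.lower text.toList
  let n : Int := blob.length
  let kwset : PySem.Set (List Char) :=
    PySem.Set.ofList (rules.flatMap (fun p => p.2.map (fun kw => PySem.Chars.lower kw.toList)))
  let lengths : List Int :=
    PySem.List.sorted (PySem.Set.ofList (kwset.map (fun k => (k.length : Int)))) (fun x => x) false
  let found : PySem.Set (List Char) :=
    (PySem.List.pyRange 0 (n + 1) 1).foldl (fun fnd i =>
      lengths.foldl (fun fnd L =>
        let w := PySem.List.slice blob (some i) (some (i + L))
        if PySem.Set.contains kwset w then PySem.Set.add fnd w else fnd) fnd)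
      PySem.Set.empty
  (rules.filter (fun p => p.2.any (fun kw => PySem.Set.contains found (PySem.Chars.lower kw.toList)))).map (fun p => p.1)

-- ===== PRECONDITION & SPEC =====
def Spec_match_tags (text : String) (rules : List (String × List String)) (out : List String) : Prop := out = match_tags_alt text rules
instance (text : String) (rules : List (String × List String)) (out : List String) : Decidable (Spec_match_tags text rules out) := by unfold Spec_match_tags; infer_instance

-- ===== CLAIM (what is proved, stated in full; the proofs are below) =====
def Claim_equal_match_tags : Prop := ∀ (text : String) (rules : List (String × List String)), Dom_match_tags text rules → Spec_match_tags text rules (match_tags text rules)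

-- ===== LEMMAS AND PROOFS =====

-- A's inner loop appends the tag iff some keyword is a substring of blob.
theorem matchTagsInnerA_eq (blob : List Char) (tag : String) (kws : List String) (hit : List String) :
    matchTagsInnerA blob tag kws hit =
      if kws.any (fun kw => PySem.Chars.isIn (PySem.Chars.lower kw.toList) blob) then hit ++ [tag] else hit := by
  induction kws with
  | nil => simp [matchTagsInnerA]
  | cons kw rest ih =>
      simp only [matchTagsInnerA, List.any_cons]
      by_cases h : PySem.Chars.isIn (PySem.Chars.lower kw.toList) blob = true
      · simp [h]
      · simp [h, ih]

-- membership after the conditional-add fold over one list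
theorem mem_foldl_addIf {α β : Type} [BEq α] [LawfulBEq α] (l : List β) (c : β → Bool) (f : β → α)
    (init : PySem.Set α) (s : α) :
    (s ∈ l.foldl (fun fnd x => if c x then PySem.Set.add fnd (f x) else fnd) init) ↔
      s ∈ init ∨ ∃ x ∈ l, c x = true ∧ f x = s := by
  induction l generalizing init with
  | nil => simp
  | cons x xs ih =>
      simp only [List.foldl_cons, ih]
      by_cases h : c x = true
      · simp only [h, if_pos]
        constructor
        · rintro (h1|h2)
          · rcases (PySem.Set.mem_add _ _ _).mp h1 with h1|h1
            · exact Or.inl h1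
            · exact Or.inr ⟨x, by simp, h, h1.symm⟩
          · rcases h2 with ⟨y, hy, hc, hf⟩
            exact Or.inr ⟨y, by simp [hy], hc, hf⟩
        · rintro (h1|⟨y, hy, hc, hf⟩)
          · exact Or.inl ((PySem.Set.mem_add _ _ _).mpr (Or.inl h1))
          · rcases List.mem_cons.mp hy with rfl|hy
            · exact Or.inl ((PySem.Set.mem_add _ _ _).mpr (Or.inr hf.symm))
            · exact Or.inr ⟨y, hy, hc, hf⟩
      · simp only [h]
        simp only [Bool.false_eq_true, if_false]
        constructor
        · rintro (h1|⟨y,hy,hc,hf⟩)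
          · exact Or.inl h1
          · exact Or.inr ⟨y, by simp [hy], hc, hf⟩
        · rintro (h1|⟨y,hy,hc,hf⟩)
          · exact Or.inl h1
          · rcases List.mem_cons.mp hy with rfl|hy
            · exact absurd hc h
            · exact Or.inr ⟨y, hy, hc, hf⟩

-- a slice with nonnegative bounds is an infix
theorem slice_infix (blob : List Char) (i L : Int) (hi : 0 ≤ i) (hL : 0 ≤ L) :
    PySem.List.slice blob (some i) (some (i + L)) <:+: blob := by
  rw [PySem.List.slice_toNat (ha := hi) (hb := by omega)]
  exact ((List.take_prefix _ _).isInfix).trans (List.drop_suffix _ _).isInfix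

-- an infix of blob is a slice at some position in range
theorem infix_eq_slice (blob s : List Char) (h : s <:+: blob) :
    ∃ i : Int, 0 ≤ i ∧ i ≤ (blob.length : Int) ∧
      PySem.List.slice blob (some i) (some (i + (s.length : Int))) = s := by
  obtain ⟨t, u, rfl⟩ := h
  refine ⟨(t.length : Int), by positivity, by simp; omega, ?_⟩
  rw [PySem.List.slice_natCast_add]
  simp


-- membership after the nested conditional-add double fold
theorem mem_foldl2 {α β γ : Type} [BEq α] [LawfulBEq α] (xs : List β) (ys : List γ)
    (c : β → γ → Bool) (f : β → γ → α) (init : PySem.Set α) (s : α) :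
    (s ∈ xs.foldl (fun fnd i =>
        ys.foldl (fun fnd L => if c i L then PySem.Set.add fnd (f i L) else fnd) fnd) init) ↔
      s ∈ init ∨ ∃ i ∈ xs, ∃ L ∈ ys, c i L = true ∧ f i L = s := by
  induction xs generalizing init with
  | nil => simp
  | cons x xs ih =>
      simp only [List.foldl_cons, ih]
      rw [mem_foldl_addIf]
      simp only [List.mem_cons]
      constructor
      · rintro ((h | ⟨L, hL, hc, hf⟩) | ⟨i, hi, L, hL, hc, hf⟩)
        · exact Or.inl h
        · exact Or.inr ⟨x, Or.inl rfl, L, hL, hc, hf⟩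
        · exact Or.inr ⟨i, Or.inr hi, L, hL, hc, hf⟩
      · rintro (h | ⟨i, rfl | hi, L, hL, hc, hf⟩)
        · exact Or.inl (Or.inl h)
        · exact Or.inl (Or.inr ⟨L, hL, hc, hf⟩)
        · exact Or.inr ⟨i, hi, L, hL, hc, hf⟩

-- characterisation of B's 'found' set: exactly the keywords that are substrings of blob
theorem mem_found (blob : List Char) (kwlist : List (List Char)) (s : List Char) :
    (s ∈ (PySem.List.pyRange 0 ((blob.length : Int) + 1) 1).foldl (fun fnd i =>
        (PySem.List.sorted
            (PySem.Set.ofList ((PySem.Set.ofList kwlist).map (fun k => (k.length : Int))))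
            (fun x => x) false).foldl
          (fun fnd L =>
            if PySem.Set.contains (PySem.Set.ofList kwlist)
                (PySem.List.slice blob (some i) (some (i + L)))
            then PySem.Set.add fnd (PySem.List.slice blob (some i) (some (i + L))) else fnd) fnd)
        PySem.Set.empty) ↔ s ∈ PySem.Set.ofList kwlist ∧ s <:+: blob := by
  rw [mem_foldl2]
  constructor
  · rintro (h | ⟨i, hi, L, hL, hc, rfl⟩)
    · simp [PySem.Set.empty] at h
    · have hi' := (PySem.List.mem_pyRange_one).mp hi
      have hL' : 0 ≤ L := by
        have := (PySem.Set.mem_ofList _ _).mp ((PySem.List.mem_sorted _ _ _ _).mp hL)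
        obtain ⟨k, _, rfl⟩ := List.mem_map.mp this
        positivity
      exact ⟨(PySem.Set.contains_iff _ _).mp hc, slice_infix blob i L hi'.1 hL'⟩
  · rintro ⟨hs, hinf⟩
    obtain ⟨i, h0, hle, hslice⟩ := infix_eq_slice blob s hinf
    refine Or.inr ⟨i, (PySem.List.mem_pyRange_one).mpr ⟨h0, by omega⟩, (s.length : Int),
      (PySem.List.mem_sorted _ _ _ _).mpr ((PySem.Set.mem_ofList _ _).mpr (List.mem_map_of_mem hs)), ?_, hslice⟩
    rw [hslice]
    exact (PySem.Set.contains_iff _ _).mpr hs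

-- A's outer loop as filter + map
theorem foldlA_eq (blob : List Char) (rules : List (String × List String)) :
    rules.foldl (fun hit p => matchTagsInnerA blob p.1 p.2 hit) ([] : List String) =
      (rules.filter (fun p => p.2.any (fun kw => PySem.Chars.isIn (PySem.Chars.lower kw.toList) blob))).map
        (fun p => p.1) := by
  simp only [matchTagsInnerA_eq]
  rw [PySem.List.foldl_append_if]
  simp

-- ===== VERDICT (by name: the statement is the Claim_ definition above) =====
theorem match_tags_spec : Claim_equal_match_tags := by
  intro text rules _
  unfold Spec_match_tags match_tags match_tags_alt
  simp only []
  rw [foldlA_eq]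
  congr 1
  apply List.filter_congr
  intro p hp
  apply PySem.List.any_congr_mem
  intro kw hkw
  have hmem : PySem.Chars.lower kw.toList ∈
      rules.flatMap (fun p => p.2.map (fun kw => PySem.Chars.lower kw.toList)) :=
    List.mem_flatMap.mpr ⟨p, hp, List.mem_map_of_mem hkw⟩
  apply Bool.coe_iff_coe.mp
  rw [PySem.Chars.isIn_iff_infix, PySem.Set.contains_iff, mem_found]
  have : PySem.Chars.lower kw.toList ∈ PySem.Set.ofList
      (rules.flatMap (fun p => p.2.map (fun kw => PySem.Chars.lower kw.toList))) :=
    (PySem.Set.mem_ofList _ _).mpr hmem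
  tauto
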